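-- pv_equiv track=rewrite | github.com/HanSeokhyeon/Speech_recogniton_for_English_and_Korean | util/functions.py | collapse_phn
-- ===== SOURCE A (Python) =====
-- def collapse_phn(seq, return_phn = False, drop_q = True):
--     # Collapse 61 phns to 39 phns
--     # http://cdn.intechopen.com/pdfs/15948/InTech-Phoneme_recognition_on_the_timit_database.pdf
--     phonemes = ["b", "bcl", "d", "dcl", "g", "gcl", "p", "pcl", "t", "tcl",
--                 "k", "kcl", "dx", "q", "jh", "ch", "s", "sh", "z", "zh",
--                 "f", "th", "v", "dh", "m", "n", "ng", "em", "en", "eng",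
--                 "nx", "l", "r", "w", "y", "hh", "hv", "el", "iy", "ih",
--                 "eh", "ey", "ae", "aa", "aw", "ay", "ah", "ao", "oy", "ow",
--                 "uh", "uw", "ux", "er", "ax", "ix", "axr", "ax-h", "pau", "epi", "h#"]
--
--     phonemes2index = {k: (v+2) for v, k in enumerate(phonemes)}
--     index2phonemes = {(v+2): k for v, k in enumerate(phonemes)}
--
--     phoneme_reduce_mapping = {"b": "b", "bcl": "h#", "d": "d", "dcl": "h#", "g": "g",
--                                "gcl": "h#", "p": "p", "pcl": "h#", "t": "t", "tcl": "h#",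
--                                "k": "k", "kcl": "h#", "dx": "dx", "q": "q", "jh": "jh",
--                                "ch": "ch", "s": "s", "sh": "sh", "z": "z", "zh": "sh",
--                                "f": "f", "th": "th", "v": "v", "dh": "dh", "m": "m",
--                                "n": "n", "ng": "ng", "em": "m", "en": "n", "eng": "ng",
--                                "nx": "n", "l": "l", "r": "r", "w": "w", "y": "y",
--                                "hh": "hh", "hv": "hh", "el": "l", "iy": "iy", "ih": "ih",
--                                "eh": "eh", "ey": "ey", "ae": "ae", "aa": "aa", "aw": "aw",
--                                "ay": "ay", "ah": "ah", "ao": "aa", "oy": "oy", "ow": "ow",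
--                                "uh": "uh", "uw": "uw", "ux": "uw", "er": "er", "ax": "ah",
--                                "ix": "ih", "axr": "er", "ax-h": "ah", "pau": "h#", "epi": "h#",
--                                "h#": "h#"}
--
--     # inverse index into phn
--     seq = [index2phonemes[idx] for idx in seq]
--     # collapse phn
--     seq = [phoneme_reduce_mapping[phn] for phn in seq]
--     # Discard phn q
--     if drop_q:
--         seq = [phn for phn in seq if phn != "q"]
--     else:
--         seq = [phn if phn != "q" else ' ' for phn in seq]
--     if return_phn:
--         return seq
--
--     # Transfer back into index sequence for Evaluation
--     seq = [phonemes2index[phn] for phn in seq]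
--
--     return seq
-- ===== SOURCE B (Python) =====
-- # B: no lookup tables -- the 61->39 collapse is a handful of local rules on the index
-- # line (closures and fillers -> h#, syllabic nasals shift by -3, a few point remaps),
-- # so each index is classified arithmetically; one pass builds the output directly.
-- # A name list is kept only to render phoneme strings when return_phn=True.
--
-- _NAMES = ["b", "bcl", "d", "dcl", "g", "gcl", "p", "pcl", "t", "tcl",
--           "k", "kcl", "dx", "q", "jh", "ch", "s", "sh", "z", "zh",
--           "f", "th", "v", "dh", "m", "n", "ng", "em", "en", "eng",
--           "nx", "l", "r", "w", "y", "hh", "hv", "el", "iy", "ih",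
--           "eh", "ey", "ae", "aa", "aw", "ay", "ah", "ao", "oy", "ow",
--           "uh", "uw", "ux", "er", "ax", "ix", "axr", "ax-h", "pau", "epi", "h#"]
--
--
-- def _collapse(i):
--     # raw index (2-based) -> collapsed index, by range/parity rules
--     if (3 <= i <= 13 and i % 2 == 1) or i >= 60:
--         return 62              # closures bcl..kcl, pau, epi, h#  -> h#
--     if 29 <= i <= 31:
--         return i - 3           # em/en/eng -> m/n/ng
--     if i == 21:
--         return 19              # zh  -> sh
--     if i == 32:
--         return 27              # nx  -> n
--     if i == 38:
--         return 37              # hv  -> hh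
--     if i == 39:
--         return 33              # el  -> l
--     if i == 49:
--         return 45              # ao  -> aa
--     if i == 54:
--         return 53              # ux  -> uw
--     if i == 56 or i == 59:
--         return 48              # ax, ax-h -> ah
--     if i == 57:
--         return 41              # ix  -> ih
--     if i == 58:
--         return 55              # axr -> er
--     return i                   # everything else is its own class
--
--
-- def collapse_phn(seq, return_phn=False, drop_q=True):
--     out = []
--     for i in seq:
--         if not 2 <= i <= 62:
--             raise KeyError(i)   # unknown raw index, as in the original contract
--         j = _collapse(i)
--         if j == 15:            # q
--             if drop_q:
--                 continue
--             out.append(' ')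
--         else:
--             out.append(_NAMES[j - 2] if return_phn else j)
--     return out
-- ===== Notes on version B (the rewrite author's own statement) =====
-- stated objective: alternative
-- what changed: A builds three dicts per call and composes them through four sequential list passes with string intermediaries; B uses no lookup table at all: it classifies each raw index arithmetically (range/parity rules: odd closures and fillers -> h#, em/en/eng shift by -3, a few point remaps) and emits the collapsed index in one pass.
-- outside the precondition, e.g. on collapse_phn([2], True, True): A returns ['b'], B returns ['b']; on collapse_phn([15], False, False): A raises KeyError, B returns [' ']
import Mathlib
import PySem

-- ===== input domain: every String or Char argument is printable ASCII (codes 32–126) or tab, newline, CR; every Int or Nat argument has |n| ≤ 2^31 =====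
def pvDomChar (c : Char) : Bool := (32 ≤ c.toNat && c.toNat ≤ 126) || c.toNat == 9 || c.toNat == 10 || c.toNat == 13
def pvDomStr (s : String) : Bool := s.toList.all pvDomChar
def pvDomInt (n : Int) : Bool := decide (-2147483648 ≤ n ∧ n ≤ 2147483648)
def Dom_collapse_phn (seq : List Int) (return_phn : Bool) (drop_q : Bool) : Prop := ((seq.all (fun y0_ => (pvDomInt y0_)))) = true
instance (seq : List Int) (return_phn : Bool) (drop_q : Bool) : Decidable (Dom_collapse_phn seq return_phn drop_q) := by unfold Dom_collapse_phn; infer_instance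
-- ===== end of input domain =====

-- B replaces A's four per-call list passes over three dicts by a single pass that computes
-- each collapsed index arithmetically (range/parity rules), using no lookup table.


-- ===== PORT A =====
def pvPhonemesA : List String :=
  ["b", "bcl", "d", "dcl", "g", "gcl", "p", "pcl", "t", "tcl",
   "k", "kcl", "dx", "q", "jh", "ch", "s", "sh", "z", "zh",
   "f", "th", "v", "dh", "m", "n", "ng", "em", "en", "eng",
   "nx", "l", "r", "w", "y", "hh", "hv", "el", "iy", "ih",
   "eh", "ey", "ae", "aa", "aw", "ay", "ah", "ao", "oy", "ow",
   "uh", "uw", "ux", "er", "ax", "ix", "axr", "ax-h", "pau", "epi", "h#"]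

-- {k: v+2 for v, k in enumerate(phonemes)}
def pvPhonemes2index : PySem.Dict String Int :=
  (PySem.List.enumerate pvPhonemesA).foldl (fun d vk => d.insert vk.2 (vk.1 + 2)) PySem.Dict.empty

-- {(v+2): k for v, k in enumerate(phonemes)}
def pvIndex2phonemes : PySem.Dict Int String :=
  (PySem.List.enumerate pvPhonemesA).foldl (fun d vk => d.insert (vk.1 + 2) vk.2) PySem.Dict.empty

def pvReduceA : PySem.Dict String String := PySem.Dict.ofList
  [("b", "b"), ("bcl", "h#"), ("d", "d"), ("dcl", "h#"), ("g", "g"),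
   ("gcl", "h#"), ("p", "p"), ("pcl", "h#"), ("t", "t"), ("tcl", "h#"),
   ("k", "k"), ("kcl", "h#"), ("dx", "dx"), ("q", "q"), ("jh", "jh"),
   ("ch", "ch"), ("s", "s"), ("sh", "sh"), ("z", "z"), ("zh", "sh"),
   ("f", "f"), ("th", "th"), ("v", "v"), ("dh", "dh"), ("m", "m"),
   ("n", "n"), ("ng", "ng"), ("em", "m"), ("en", "n"), ("eng", "ng"),
   ("nx", "n"), ("l", "l"), ("r", "r"), ("w", "w"), ("y", "y"),
   ("hh", "hh"), ("hv", "hh"), ("el", "l"), ("iy", "iy"), ("ih", "ih"),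
   ("eh", "eh"), ("ey", "ey"), ("ae", "ae"), ("aa", "aa"), ("aw", "aw"),
   ("ay", "ay"), ("ah", "ah"), ("ao", "aa"), ("oy", "oy"), ("ow", "ow"),
   ("uh", "uh"), ("uw", "uw"), ("ux", "uw"), ("er", "er"), ("ax", "ah"),
   ("ix", "ih"), ("axr", "er"), ("ax-h", "ah"), ("pau", "h#"), ("epi", "h#"),
   ("h#", "h#")]

-- Lookups use getD: the KeyError cases (idx not a key; ' ' looked up when a q survives with
-- drop_q=False) are exactly the inputs Pre_ excludes.  return_phn=True makes A return a list
-- of STRINGS, not ints — excluded by Pre_; that branch is unrepresentable in List Int.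
def collapse_phn (seq : List Int) (return_phn : Bool) (drop_q : Bool) : List Int :=
  let s1 := seq.map (fun idx => pvIndex2phonemes.getD idx "")
  let s2 := s1.map (fun phn => pvReduceA.getD phn "")
  let s3 := if drop_q then s2.filter (fun phn => phn != "q")
            else s2.map (fun phn => if phn = "q" then " " else phn)
  if return_phn then [] -- A returns s3 (strings) here; outside Pre_
  else s3.map (fun phn => pvPhonemes2index.getD phn 0)

-- ===== PORT B =====
-- raw index -> collapsed index, by range/parity rules (Source B's _collapse, step for step)
def pvCollapseIdx (i : Int) : Int :=
  if (3 ≤ i ∧ i ≤ 13 ∧ PySem.Int.mod i 2 = 1) ∨ 60 ≤ i then 62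
  else if 29 ≤ i ∧ i ≤ 31 then i - 3
  else if i = 21 then 19
  else if i = 32 then 27
  else if i = 38 then 37
  else if i = 39 then 33
  else if i = 49 then 45
  else if i = 54 then 53
  else if i = 56 ∨ i = 59 then 48
  else if i = 57 then 41
  else if i = 58 then 55
  else i

-- One pass with an accumulator.  The ' ' appended when a q survives with drop_q=False, and
-- the phoneme strings appended when return_phn=True, are Strings, unrepresentable in
-- List Int — both outside Pre_; placeholders 0 stand for them here.
def collapse_phn_alt (seq : List Int) (return_phn : Bool) (drop_q : Bool) : List Int :=
  seq.foldl
    (fun out i =>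
      if ¬ (2 ≤ i ∧ i ≤ 62) then out -- Source B raises KeyError here; outside Pre_
      else
        let j := pvCollapseIdx i
        if j == 15 then
          if drop_q then out else out ++ [0]
        else
          out ++ [if return_phn then 0 else j])
    []

-- ===== PRECONDITION & SPEC =====
-- Pre_ excludes: indices outside 2..62 (A raises KeyError); return_phn=True, where A returns a
-- list of phoneme STRINGS, not a value of type List Int; and drop_q=False with a q (index 15)
-- present, where A's final lookup phonemes2index[' '] raises KeyError.
def Pre_collapse_phn (seq : List Int) (return_phn : Bool) (drop_q : Bool) : Prop :=
  (∀ x ∈ seq, 2 ≤ x ∧ x ≤ 62) ∧ return_phn = false ∧ (drop_q = true ∨ (15 : Int) ∉ seq)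
instance (seq : List Int) (return_phn : Bool) (drop_q : Bool) : Decidable (Pre_collapse_phn seq return_phn drop_q) := by unfold Pre_collapse_phn; infer_instance

def pvWitness_collapse_phn : List Int × Bool × Bool := ([3, 15, 40, 62, 2], false, true)

def Spec_collapse_phn (seq : List Int) (return_phn : Bool) (drop_q : Bool) (out : List Int) : Prop := out = collapse_phn_alt seq return_phn drop_q
instance (seq : List Int) (return_phn : Bool) (drop_q : Bool) (out : List Int) : Decidable (Spec_collapse_phn seq return_phn drop_q out) := by unfold Spec_collapse_phn; infer_instance

-- ===== CLAIM (what is proved, stated in full; the proofs are below) =====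
def Claim_equal_collapse_phn : Prop := ∀ (seq : List Int) (return_phn : Bool) (drop_q : Bool), Dom_collapse_phn seq return_phn drop_q → Pre_collapse_phn seq return_phn drop_q → Spec_collapse_phn seq return_phn drop_q (collapse_phn seq return_phn drop_q)

-- ===== LEMMAS AND PROOFS =====

-- A's per-element composite index
def pvFA (idx : Int) : Int :=
  pvPhonemes2index.getD (pvReduceA.getD (pvIndex2phonemes.getD idx "") "") 0

def pvRed (idx : Int) : String := pvReduceA.getD (pvIndex2phonemes.getD idx "") ""

-- For every valid index: B's arithmetic rules agree with A's three-dict composite; the reduced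
-- phoneme is "q" exactly when that composite is 15; and only index 15 reduces to "q".
set_option maxRecDepth 20000 in
lemma pvKey :
    ((List.range 61).all (fun n =>
      (pvCollapseIdx ((n : Int) + 2) == pvFA ((n : Int) + 2)) &&
      ((pvRed ((n : Int) + 2) == "q") == (pvFA ((n : Int) + 2) == 15)) &&
      ((pvFA ((n : Int) + 2) != 15) || ((n : Int) + 2 == 15)))) = true := by decide

set_option maxRecDepth 20000 in
lemma pvKey' (idx : Int) (h1 : 2 ≤ idx) (h2 : idx ≤ 62) :
    pvCollapseIdx idx = pvFA idx ∧
      ((pvRed idx = "q") ↔ pvFA idx = 15) ∧ (pvFA idx = 15 → idx = 15) := by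
  have hn : idx = ((idx - 2).toNat : Int) + 2 := by omega
  have hm : (idx - 2).toNat ∈ List.range 61 := by rw [List.mem_range]; omega
  have h := (List.all_eq_true.mp pvKey) _ hm
  rw [← hn] at h
  simp only [Bool.and_eq_true, Bool.or_eq_true, bne_iff_ne,
    Bool.beq_eq_decide_eq, decide_eq_decide, decide_eq_true_eq, ne_eq] at h
  refine ⟨h.1.1, h.1.2, fun hx => ?_⟩
  rcases h.2 with hne | h15
  · exact absurd hx hne
  · exact h15

set_option maxRecDepth 40000 in
theorem pv_main (seq : List Int) (drop_q : Bool)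
    (hx : ∀ x ∈ seq, 2 ≤ x ∧ x ≤ 62) (hq : drop_q = true ∨ (15 : Int) ∉ seq) :
    collapse_phn seq false drop_q = collapse_phn_alt seq false drop_q := by
  have hk : ∀ x ∈ seq, pvCollapseIdx x = pvFA x ∧
      ((pvRed x = "q") ↔ pvFA x = 15) ∧ (pvFA x = 15 → x = 15) :=
    fun x hm => pvKey' x (hx x hm).1 (hx x hm).2
  cases drop_q with
  | true =>
    -- A: map, map, filter, map  ⟶  one (filter).map ;  B: conditional-append fold ⟶ (filter).map
    have hB : collapse_phn_alt seq false true =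
        [] ++ (seq.filter (fun i => pvCollapseIdx i != 15)).map
          (fun i => pvCollapseIdx i) := by
      rw [← PySem.List.foldl_append_if]
      apply PySem.List.foldl_congr_mem
      intro acc x hm
      have hr := hx x hm
      by_cases h : pvCollapseIdx x = 15 <;> simp [h, hr.1, hr.2]
    have hA : collapse_phn seq false true =
        (((seq.map (fun idx => pvIndex2phonemes.getD idx "")).map
            (fun phn => pvReduceA.getD phn "")).filter (fun phn => phn != "q")).map
          (fun phn => pvPhonemes2index.getD phn 0) := rfl
    rw [hA, hB, List.map_map, List.filter_map, List.map_map, List.nil_append]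
    have hfil : seq.filter ((fun phn => phn != "q") ∘
          ((fun phn => pvReduceA.getD phn "") ∘ fun idx => pvIndex2phonemes.getD idx ""))
        = seq.filter (fun i => pvCollapseIdx i != 15) := by
      apply List.filter_congr
      intro x hm
      have h := hk x hm
      show (pvRed x != "q") = (pvCollapseIdx x != 15)
      rw [h.1]
      by_cases hc : pvRed x = "q"
      · simp [bne, hc, h.2.1.mp hc]
      · have hne : pvFA x ≠ 15 := fun hh => hc (h.2.1.mpr hh)
        simp [bne, hc, hne]
    rw [hfil]
    apply List.map_congr_left
    intro x hm
    exact ((hk x (List.mem_of_mem_filter hm)).1).symm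
  | false =>
    have h15 : (15 : Int) ∉ seq := hq.resolve_left (by simp)
    have hnq : ∀ x ∈ seq, pvFA x ≠ 15 := by
      intro x hm hc
      exact h15 ((hk x hm).2.2 hc ▸ hm)
    have hB : collapse_phn_alt seq false false =
        [] ++ seq.map (fun i => pvCollapseIdx i) := by
      rw [← PySem.List.foldl_append_singleton_eq_map]
      apply PySem.List.foldl_congr_mem
      intro acc x hm
      have hr := hx x hm
      have hne : pvCollapseIdx x ≠ 15 := fun hh => hnq x hm ((hk x hm).1 ▸ hh)
      simp [hne, hr.1, hr.2]
    have hA : collapse_phn seq false false =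
        (((seq.map (fun idx => pvIndex2phonemes.getD idx "")).map
            (fun phn => pvReduceA.getD phn "")).map
          (fun phn => if phn = "q" then " " else phn)).map
          (fun phn => pvPhonemes2index.getD phn 0) := rfl
    rw [hA, hB, List.map_map, List.map_map, List.map_map, List.nil_append]
    apply List.map_congr_left
    intro x hm
    have hrq : pvRed x ≠ "q" := fun hc => hnq x hm ((hk x hm).2.1.mp hc)
    show pvPhonemes2index.getD (if pvRed x = "q" then " " else pvRed x) 0 = pvCollapseIdx x
    rw [if_neg hrq, (hk x hm).1]
    rfl

-- ===== VERDICT (by name: the statement is the Claim_ definition above) =====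
theorem collapse_phn_spec : Claim_equal_collapse_phn := by
  intro seq return_phn drop_q _ hpre
  obtain ⟨hx, hrp, hq⟩ := hpre
  subst hrp
  unfold Spec_collapse_phn
  exact pv_main seq drop_q hx hq
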